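-- pv_equiv track=rewrite | github.com/Aasthaengg/IBMdataset | Python_codes/p02873/s630994043.py | count_ll
-- ===== SOURCE A (Python) =====
-- def count_ll(l):
--
--     ret = [0]
--     cur = 0
--
--     for c in l:
--         if c == "<":
--             cur += 1
--         else:
--             cur = 0
--
--         ret.append(cur)
--
--     return ret
-- ===== SOURCE B (Python) =====
-- from itertools import groupby
--
-- def count_ll(l):
--     ret = [0]
--     for is_lt, run in groupby(l, key=lambda c: c == "<"):
--         n = sum(1 for _ in run)
--         if is_lt:
--             ret.extend(range(1, n + 1))
--         else:
--             ret.extend([0] * n)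
--     return ret
-- ===== Notes on version B (the rewrite author's own statement) =====
-- stated objective: alternative
-- what changed: B splits the string into maximal runs with itertools.groupby and emits whole runs at once (1..n for a '<'-run, n zeros otherwise) instead of maintaining a per-character counter.
import Mathlib
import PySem

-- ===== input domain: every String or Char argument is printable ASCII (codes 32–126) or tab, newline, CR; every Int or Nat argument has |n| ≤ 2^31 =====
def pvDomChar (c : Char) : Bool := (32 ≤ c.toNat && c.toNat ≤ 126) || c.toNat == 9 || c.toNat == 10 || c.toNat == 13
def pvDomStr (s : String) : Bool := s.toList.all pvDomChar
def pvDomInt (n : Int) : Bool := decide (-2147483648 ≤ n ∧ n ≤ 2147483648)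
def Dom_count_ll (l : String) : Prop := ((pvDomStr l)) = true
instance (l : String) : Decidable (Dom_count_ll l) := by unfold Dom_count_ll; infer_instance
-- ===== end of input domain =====

-- B emits whole runs at once (1..n for a '<'-run, n zeros otherwise) instead of a per-character counter; same cost, different decomposition.
-- ===== PORT A =====
def count_ll (l : String) : List Int :=
  (l.toList.foldl (fun (st : List Int × Int) c =>
    let cur := if c = '<' then st.2 + 1 else 0
    (st.1 ++ [cur], cur)) ([0], 0)).1

-- ===== PORT B =====
-- groupby ported as: recursion over maximal runs via takeWhile/dropWhile
def runsB : List Char → List Int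
  | [] => []
  | c :: cs =>
    if c = '<' then
      ((List.range ((c :: cs).takeWhile (· = '<')).length).map (fun i : Nat => (i : Int) + 1))
        ++ runsB ((c :: cs).dropWhile (· = '<'))
    else 0 :: runsB cs
termination_by cs => cs.length
decreasing_by
· simp only [List.dropWhile, *, decide_true, List.length_cons]
  exact Nat.lt_succ_of_le (List.length_dropWhile_le _ _)
· simp

def count_ll_alt (l : String) : List Int := 0 :: runsB l.toList

-- ===== PRECONDITION & SPEC =====
def Spec_count_ll (l : String) (out : List Int) : Prop := out = count_ll_alt l
instance (l : String) (out : List Int) : Decidable (Spec_count_ll l out) := by unfold Spec_count_ll; infer_instance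

-- ===== CLAIM (what is proved, stated in full; the proofs are below) =====
def Claim_equal_count_ll : Prop := ∀ (l : String), Dom_count_ll l → Spec_count_ll l (count_ll l)

-- ===== LEMMAS AND PROOFS =====

-- ===== VERDICT (by name: the statement is the Claim_ definition above) =====
-- per-character outputs of A's loop
def fA : List Char → Int → List Int
  | [], _ => []
  | c :: cs, cur =>
    let cur' := if c = '<' then cur + 1 else 0
    cur' :: fA cs cur'

theorem foldl_fA (cs : List Char) (acc : List Int) (cur : Int) :
    (cs.foldl (fun (st : List Int × Int) c =>
      let cur := if c = '<' then st.2 + 1 else 0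
      (st.1 ++ [cur], cur)) (acc, cur)).1 = acc ++ fA cs cur := by
  induction cs generalizing acc cur with
  | nil => simp [fA]
  | cons c cs ih => simp [fA, ih]

theorem fA_run (cs : List Char) (cur : Int) :
    fA cs cur = ((List.range (cs.takeWhile (· = '<')).length).map (fun i : Nat => cur + 1 + (i : Int)))
      ++ fA (cs.dropWhile (· = '<')) 0 := by
  induction cs generalizing cur with
  | nil => simp [fA]
  | cons c cs ih =>
    by_cases h : c = '<'
    · subst h
      have ht : (('<' :: cs).takeWhile (· = '<')) = '<' :: cs.takeWhile (· = '<') := by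
        simp [List.takeWhile]
      have hd : (('<' :: cs).dropWhile (· = '<')) = cs.dropWhile (· = '<') := by
        simp [List.dropWhile]
      have hfa : fA ('<' :: cs) cur = (cur + 1) :: fA cs (cur + 1) := by simp [fA]
      rw [hfa, ih, ht, hd, List.length_cons, List.range_succ_eq_map,
        List.map_cons, List.map_map, List.cons_append]
      congr 1
      · norm_num
      congr 1
      apply List.map_congr_left
      intro i _
      simp only [Function.comp_apply]
      push_cast
      ring
    · simp [fA, List.takeWhile, List.dropWhile, h]

theorem runsB_eq_fA (cs : List Char) : runsB cs = fA cs 0 := by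
  induction cs using runsB.induct with
  | case1 => simp [runsB, fA]
  | case2 cs ih =>
    rw [runsB, if_pos rfl, ih, fA_run ('<' :: cs) 0]
    congr 1
    apply List.map_congr_left
    intro i _
    ring
  | case3 c cs h ih =>
    simp [runsB, fA, h, ih]

-- ===== VERDICT (by name: the statement is the Claim_ definition above) =====
theorem count_ll_spec : Claim_equal_count_ll := by
  intro l _
  unfold Spec_count_ll count_ll count_ll_alt
  rw [foldl_fA, runsB_eq_fA]
  simp
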